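-- pv_equiv track=rewrite | github.com/eyjs/ai-platform | apps/api/src/pipeline/parsing/pdf_analyzer.py | _detect_table_hints
-- ===== SOURCE A (Python) =====
-- _TABLE_LINE_KEYWORDS = {"─", "━", "│", "┃", "|", "+", "-+-"}
--
-- def _detect_table_hints(text: str) -> bool:
--     """텍스트에서 표 구조 힌트를 감지한다.
--
--     완벽한 표 감지가 아닌 빠른 휴리스틱.
--     실제 표 추출은 DocForge가 담당한다.
--     """
--     lines = text.split("\n")
--     consecutive_short = 0
--     tab_lines = 0
--
--     for line in lines:
--         stripped = line.strip()
--
--         # 표 구분자 문자 감지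
--         for keyword in _TABLE_LINE_KEYWORDS:
--             if keyword in stripped:
--                 return True
--
--         # 탭 구분 데이터 (CSV-like)
--         if "\t" in stripped and len(stripped) > 5:
--             tab_lines += 1
--             if tab_lines >= 3:
--                 return True
--
--         # 연속된 짧은 줄 (표의 셀이 줄바꿈으로 분리된 경우)
--         if 1 < len(stripped) < 30:
--             consecutive_short += 1
--             if consecutive_short >= 5:
--                 return True
--         else:
--             consecutive_short = 0
--
--     return False
-- ===== SOURCE B (Python) =====
-- _TABLE_LINE_KEYWORDS = {"─", "━", "│", "┃", "|", "+", "-+-"}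
--
-- def _detect_table_hints(text: str) -> bool:
--     lines = [line.strip() for line in text.split("\n")]
--     # 1) any table-separator keyword anywhere
--     if any(kw in s for s in lines for kw in _TABLE_LINE_KEYWORDS):
--         return True
--     # 2) at least 3 tab-separated data lines in total (cumulative, no reset)
--     if sum(1 for s in lines if "\t" in s and len(s) > 5) >= 3:
--         return True
--     # 3) a run of at least 5 consecutive short lines
--     cur = best = 0
--     for s in lines:
--         cur = cur + 1 if 1 < len(s) < 30 else 0
--         best = max(best, cur)
--     return best >= 5
-- ===== Notes on version B (the rewrite author's own statement) =====
-- stated objective: simpler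
-- what changed: Replaces A's single stateful loop with two counters and early returns by the OR of three independent checks: an any() over keywords, a cumulative count of tab lines compared to 3, and a separate longest-consecutive-short-run scan compared to 5.
import Mathlib
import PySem

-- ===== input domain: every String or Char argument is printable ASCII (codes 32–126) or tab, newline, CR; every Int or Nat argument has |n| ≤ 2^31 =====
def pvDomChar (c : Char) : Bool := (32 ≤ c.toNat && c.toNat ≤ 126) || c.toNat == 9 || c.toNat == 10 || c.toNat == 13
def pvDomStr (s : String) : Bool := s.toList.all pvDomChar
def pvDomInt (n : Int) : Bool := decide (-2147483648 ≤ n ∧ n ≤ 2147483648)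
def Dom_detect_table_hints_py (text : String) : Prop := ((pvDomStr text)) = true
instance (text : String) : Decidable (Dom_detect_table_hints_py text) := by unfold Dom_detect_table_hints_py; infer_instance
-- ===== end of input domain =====

-- B replaces A's single stateful loop (early returns, two counters) by the OR of three
-- independent checks over the stripped lines; objective: simpler decomposition.

-- ===== PORT A =====
-- the module constant _TABLE_LINE_KEYWORDS (a set of string literals; iteration order
-- does not affect the boolean result)
def pvTableKeywordsA : List (List Char) :=
  ["─".toList, "━".toList, "│".toList, "┃".toList, "|".toList, "+".toList, "-+-".toList]

-- inner 'for keyword in _TABLE_LINE_KEYWORDS: if keyword in stripped: return True'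
def pvKwLoopA (ks : List (List Char)) (stripped : List Char) : Bool :=
  match ks with
  | [] => false
  | k :: rest => if PySem.Chars.isIn k stripped then true else pvKwLoopA rest stripped

-- the main 'for line in lines' loop with state (consecutive_short, tab_lines)
def pvLoopA (lines : List (List Char)) (consecutiveShort tabLines : Nat) : Bool :=
  match lines with
  | [] => false
  | line :: rest =>
    let stripped := PySem.Chars.strip line
    if pvKwLoopA pvTableKeywordsA stripped then true
    else
      let tabLines' :=
        if PySem.Chars.isIn ['\t'] stripped && decide (5 < PySem.Chars.len stripped) then
          tabLines + 1
        else tabLines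
      if (PySem.Chars.isIn ['\t'] stripped && decide (5 < PySem.Chars.len stripped)) &&
          decide (3 ≤ tabLines') then true
      else
        if decide (1 < PySem.Chars.len stripped) && decide (PySem.Chars.len stripped < 30) then
          if decide (5 ≤ consecutiveShort + 1) then true
          else pvLoopA rest (consecutiveShort + 1) tabLines'
        else pvLoopA rest 0 tabLines'

def detect_table_hints_py (text : String) : Bool :=
  pvLoopA (PySem.Chars.splitOn text.toList ['\n']) 0 0

-- ===== PORT B =====
def pvTableKeywordsB : List (List Char) :=
  ["─".toList, "━".toList, "│".toList, "┃".toList, "|".toList, "+".toList, "-+-".toList]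

def pvShortB (s : List Char) : Bool :=
  decide (1 < PySem.Chars.len s) && decide (PySem.Chars.len s < 30)

def pvTabbyB (s : List Char) : Bool :=
  PySem.Chars.isIn ['\t'] s && decide (5 < PySem.Chars.len s)

-- the 'cur/best' longest-run fold of Source B
def pvRunFoldB (lines : List (List Char)) (p : Nat × Nat) : Nat × Nat :=
  lines.foldl (fun p s => let cur := if pvShortB s then p.1 + 1 else 0; (cur, max p.2 cur)) p

def detect_table_hints_py_alt (text : String) : Bool :=
  let lines := (PySem.Chars.splitOn text.toList ['\n']).map PySem.Chars.strip
  if lines.any (fun s => pvTableKeywordsB.any (fun k => PySem.Chars.isIn k s)) then true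
  else if decide (3 ≤ lines.countP pvTabbyB) then true
  else decide (5 ≤ (pvRunFoldB lines (0, 0)).2)

-- ===== PRECONDITION & SPEC =====
def Spec_detect_table_hints_py (text : String) (out : Bool) : Prop := out = detect_table_hints_py_alt text
instance (text : String) (out : Bool) : Decidable (Spec_detect_table_hints_py text out) := by unfold Spec_detect_table_hints_py; infer_instance

-- ===== CLAIM (what is proved, stated in full; the proofs are below) =====
def Claim_equal_detect_table_hints_py : Prop := ∀ (text : String), Dom_detect_table_hints_py text → Spec_detect_table_hints_py text (detect_table_hints_py text)

-- ===== LEMMAS AND PROOFS =====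

-- A's inner keyword loop is List.any
theorem pvKwLoopA_eq_any (ks : List (List Char)) (s : List Char) :
    pvKwLoopA ks s = ks.any (fun k => PySem.Chars.isIn k s) := by
  induction ks with
  | nil => rfl
  | cons k rest ih => simp [pvKwLoopA, ih]

-- 'did some consecutive-short run starting at cs reach 5' as structural recursion
def pvReach (lines : List (List Char)) (cs : Nat) : Bool :=
  match lines with
  | [] => false
  | s :: rest =>
    if pvShortB s then (decide (5 ≤ cs + 1) || pvReach rest (cs + 1))
    else pvReach rest 0

theorem pvRunFoldB_cons (s : List Char) (rest : List (List Char)) (p : Nat × Nat) :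
    pvRunFoldB (s :: rest) p =
      pvRunFoldB rest
        (if pvShortB s then p.1 + 1 else 0, max p.2 (if pvShortB s then p.1 + 1 else 0)) := rfl

theorem pvRunFold_ge_iff (lines : List (List Char)) (cur best : Nat) :
    decide (5 ≤ (pvRunFoldB lines (cur, best)).2) = (decide (5 ≤ best) || pvReach lines cur) := by
  induction lines generalizing cur best with
  | nil => simp [pvRunFoldB, pvReach]
  | cons s rest ih =>
    rw [pvRunFoldB_cons]
    by_cases h : pvShortB s = true
    · simp only [h, if_pos, pvReach]
      rw [ih]
      simp only [le_max_iff, Bool.decide_or]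
      cases pvReach rest (cur + 1) <;> by_cases hb : 5 ≤ best <;>
        by_cases h5 : 5 ≤ cur + 1 <;> simp [hb, h5]
    · simp only [h, Bool.false_eq_true, if_neg, not_false_iff, pvReach, Nat.max_zero]
      rw [ih]

-- 'reach' over the raw lines (stripping inside), the shape of A's short-run logic
def pvReach2 (lines : List (List Char)) (cs : Nat) : Bool :=
  match lines with
  | [] => false
  | l :: rest =>
    if pvShortB (PySem.Chars.strip l) then (decide (5 ≤ cs + 1) || pvReach2 rest (cs + 1))
    else pvReach2 rest 0

theorem pvReach_map (lines : List (List Char)) (cs : Nat) :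
    pvReach (lines.map PySem.Chars.strip) cs = pvReach2 lines cs := by
  induction lines generalizing cs with
  | nil => rfl
  | cons l rest ih =>
    simp only [List.map_cons, pvReach, pvReach2]
    by_cases h : pvShortB (PySem.Chars.strip l) = true <;> simp [h, ih]

-- A's loop computes the OR of the three independent checks; the tab counter never
-- reaches 3 in a reachable state (A returns the moment it does), hence tl < 3.
theorem pvLoopA_eq (lines : List (List Char)) (cs tl : Nat) (htl : tl < 3) :
    pvLoopA lines cs tl =
      (lines.any (fun l => pvTableKeywordsA.any
          (fun k => PySem.Chars.isIn k (PySem.Chars.strip l)))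
        || decide (3 ≤ tl + lines.countP (fun l => pvTabbyB (PySem.Chars.strip l)))
        || pvReach2 lines cs) := by
  induction lines generalizing cs tl with
  | nil => simp [pvLoopA, pvReach2]; omega
  | cons line rest ih =>
    simp only [pvLoopA, pvKwLoopA_eq_any, List.any_cons, List.countP_cons, pvReach2]
    by_cases hkw : (pvTableKeywordsA.any
        (fun k => PySem.Chars.isIn k (PySem.Chars.strip line))) = true
    · simp [hkw]
    · have hkw' := eq_false_of_ne_true hkw
      have ihp := ih (cs + 1) tl htl
      have ihz := ih 0 tl htl
      by_cases h3 : 2 ≤ tl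
      · clear ih hkw
        have hd : 3 ≤ tl +
            (List.countP (fun l => pvTabbyB (PySem.Chars.strip l)) rest + 1) := by omega
        by_cases hIn : PySem.Chars.isIn ['\t'] (PySem.Chars.strip line) = true <;>
        by_cases h5l : 5 < (PySem.Chars.strip line).length <;>
        by_cases h1l : 1 < (PySem.Chars.strip line).length <;>
        by_cases h30 : (PySem.Chars.strip line).length < 30 <;>
        by_cases h5 : 4 ≤ cs <;>
        simp [pvTabbyB, pvShortB, *] <;> omega
      · have ihp' := ih (cs + 1) (tl + 1) (by omega)
        have ihz' := ih 0 (tl + 1) (by omega)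
        clear ih hkw
        by_cases hIn : PySem.Chars.isIn ['\t'] (PySem.Chars.strip line) = true <;>
        by_cases h5l : 5 < (PySem.Chars.strip line).length <;>
        by_cases h1l : 1 < (PySem.Chars.strip line).length <;>
        by_cases h30 : (PySem.Chars.strip line).length < 30 <;>
        by_cases h5 : 4 ≤ cs <;>
        simp [pvTabbyB, pvShortB, Nat.add_assoc, Nat.add_comm, *]

-- ===== VERDICT (by name: the statement is the Claim_ definition above) =====
theorem detect_table_hints_py_spec : Claim_equal_detect_table_hints_py := by
  intro text _
  unfold Spec_detect_table_hints_py detect_table_hints_py detect_table_hints_py_alt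
  rw [pvLoopA_eq _ 0 0 (by omega)]
  show _ = (if ((PySem.Chars.splitOn text.toList ['\n']).map PySem.Chars.strip).any
        (fun s => pvTableKeywordsB.any (fun k => PySem.Chars.isIn k s)) then true
    else if decide (3 ≤ ((PySem.Chars.splitOn text.toList ['\n']).map
        PySem.Chars.strip).countP pvTabbyB) then true
    else decide (5 ≤ (pvRunFoldB ((PySem.Chars.splitOn text.toList ['\n']).map
        PySem.Chars.strip) (0, 0)).2))
  rw [pvRunFold_ge_iff, pvReach_map]
  rw [show pvTableKeywordsB = pvTableKeywordsA from rfl]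
  by_cases ha : ((PySem.Chars.splitOn text.toList ['\n']).any
      (fun l => pvTableKeywordsA.any (fun k => PySem.Chars.isIn k (PySem.Chars.strip l)))) = true
  · simp [ha, List.any_map, Function.comp_def]
  · by_cases hb : 3 ≤ (PySem.Chars.splitOn text.toList ['\n']).countP
        (fun l => pvTabbyB (PySem.Chars.strip l))
    · simp [ha, hb, List.any_map, List.countP_map, Function.comp_def]
    · simp [ha, hb, List.any_map, List.countP_map, Function.comp_def]
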